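-- pv_equiv track=rewrite | github.com/Gavin0019/Text-to-Sql-hallucination | evaluate_kg_path.py | min_added_nodes_between
-- ===== SOURCE A (Python) =====
-- import heapq
-- from typing import Dict, List, Set, Tuple
--
-- def min_added_nodes_between(
--     graph: Dict[str, Set[str]], pred_nodes: Set[str], start: str, end: str
-- ) -> int | None:
--     pq: List[Tuple[int, str]] = [(0, start)]
--     best: Dict[str, int] = {start: 0}
--
--     while pq:
--         cost, node = heapq.heappop(pq)
--         if node == end:
--             return cost
--         for nxt in graph.get(node, []):
--             add = 0 if nxt in pred_nodes else 1
--             new_cost = cost + add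
--             if new_cost < best.get(nxt, 999):
--                 best[nxt] = new_cost
--                 heapq.heappush(pq, (new_cost, nxt))
--     return None
-- ===== SOURCE B (Python) =====
-- def min_added_nodes_between(graph, pred_nodes, start, end):
--     # 0-1 BFS by cost layers instead of Dijkstra with a heap: every queued
--     # node of the current layer has the same cost, so no (cost, node) tuples
--     # and no heap ordering are needed -- 0-weight relaxations stay in the
--     # current layer (`cur`, popped LIFO), 1-weight ones go to the next (`nxt`).
--     dist = {start: 0}
--     cur = [start]
--     nxt = []
--     cost = 0
--     while cur or nxt:
--         if not cur:
--             cur = nxt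
--             nxt = []
--             cost += 1
--         node = cur.pop()
--         if node == end:
--             return cost
--         for x in graph.get(node, []):
--             new_cost = cost if x in pred_nodes else cost + 1
--             if new_cost < dist.get(x, 999):
--                 dist[x] = new_cost
--                 if new_cost == cost:
--                     cur.append(x)
--                 else:
--                     nxt.append(x)
--     return None
-- ===== Notes on version B (the rewrite author's own statement) =====
-- stated objective: alternative
-- what changed: Replaced heap-based Dijkstra (a heapq of (cost,node) tuples) by a layered 0-1 BFS: two plain stacks hold the current cost layer and the next one, 0-weight relaxations stay in the current layer and 1-weight ones go to the next, so no heap and no per-entry cost tuples are needed.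
import Mathlib
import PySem

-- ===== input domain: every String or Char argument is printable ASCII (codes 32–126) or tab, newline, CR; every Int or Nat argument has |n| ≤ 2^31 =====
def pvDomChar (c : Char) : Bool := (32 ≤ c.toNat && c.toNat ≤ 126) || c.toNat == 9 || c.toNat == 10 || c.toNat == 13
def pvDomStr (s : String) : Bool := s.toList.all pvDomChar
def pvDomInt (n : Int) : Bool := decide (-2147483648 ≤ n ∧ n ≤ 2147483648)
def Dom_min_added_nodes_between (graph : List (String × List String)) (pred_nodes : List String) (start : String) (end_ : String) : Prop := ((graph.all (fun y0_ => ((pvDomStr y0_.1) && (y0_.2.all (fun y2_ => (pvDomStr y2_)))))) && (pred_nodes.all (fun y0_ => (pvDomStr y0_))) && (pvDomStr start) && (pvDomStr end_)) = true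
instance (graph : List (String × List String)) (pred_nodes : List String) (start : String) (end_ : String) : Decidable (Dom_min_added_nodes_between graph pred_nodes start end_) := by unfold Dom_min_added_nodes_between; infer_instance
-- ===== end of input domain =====

-- B replaces A's heap-based Dijkstra by a layered 0-1 BFS (two stacks, no heap,
-- no (cost, node) tuples); both programs return the same Optional[int] everywhere.

-- ===== PORT A =====
-- helpers shared by both ports: graph.get(node, []) and best.get(v, 999)
def pvAdj (g : PySem.Dict String (List String)) (u : String) : List String :=
  PySem.Dict.getD g u []
def pvBget (best : PySem.Dict String Int) (v : String) : Int :=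
  PySem.Dict.getD best v 999
-- fuel for the while-loops (a Lean termination artifact only: the proofs show the
-- loops always finish — return or empty queue — strictly before the fuel runs out)
def pvFuel (graph : List (String × List String)) : Nat :=
  1000 * (2 + (graph.map (fun p => p.2.length)).sum)

-- heapq.heappop: the smallest (cost, node) tuple in Python's lexicographic tuple order
def pvHeapMin : (Int × String) → List (Int × String) → (Int × String)
  | m, [] => m
  | m, x :: xs => pvHeapMin (if x.1 < m.1 ∨ (x.1 = m.1 ∧ x.2 < m.2) then x else m) xs

-- the body of A's inner `for nxt in graph.get(node, [])` loop (the heap is a plain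
-- list of entries here: heappush appends, heappop extracts the minimal tuple)
def pvRelaxA (pred_nodes : List String) (cost : Int)
    (st : List (Int × String) × PySem.Dict String Int) (nxt : String) :
    List (Int × String) × PySem.Dict String Int :=
  let add : Int := if nxt ∈ pred_nodes then 0 else 1
  let new_cost := cost + add
  if new_cost < pvBget st.2 nxt then
    (st.1 ++ [(new_cost, nxt)], PySem.Dict.insert st.2 nxt new_cost)
  else st

-- A's `while pq:` loop
def pvLoopA (g : PySem.Dict String (List String)) (pred_nodes : List String) (end_ : String) :
    Nat → List (Int × String) → PySem.Dict String Int → Option Int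
  | 0, _, _ => none
  | _ + 1, [], _ => none
  | fuel + 1, p :: rest, best =>
    let m := pvHeapMin p rest
    let pq' := (p :: rest).erase m
    if m.2 = end_ then some m.1
    else
      let st := (pvAdj g m.2).foldl (pvRelaxA pred_nodes m.1) (pq', best)
      pvLoopA g pred_nodes end_ fuel st.1 st.2

def min_added_nodes_between (graph : List (String × List String)) (pred_nodes : List String) (start : String) (end_ : String) : Option Int :=
  pvLoopA (PySem.Dict.ofList graph) pred_nodes end_ (pvFuel graph)
    [(0, start)] (PySem.Dict.mk [(start, 0)])

-- ===== PORT B =====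
-- Source B's Python lists `cur` and `nxt` are kept REVERSED here, so that Python's
-- append / pop() at the right end become cons / head on the Lean side.
def pvRelaxB (pred_nodes : List String) (cost : Int)
    (st : PySem.Dict String Int × List String × List String) (x : String) :
    PySem.Dict String Int × List String × List String :=
  let new_cost : Int := if x ∈ pred_nodes then cost else cost + 1
  if new_cost < pvBget st.1 x then
    if new_cost = cost then (PySem.Dict.insert st.1 x new_cost, x :: st.2.1, st.2.2)
    else (PySem.Dict.insert st.1 x new_cost, st.2.1, x :: st.2.2)
  else st

-- B's `while cur or nxt:` loop (third branch = the `if not cur:` layer switch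
-- followed by the pop, in one step)
def pvLoopB (g : PySem.Dict String (List String)) (pred_nodes : List String) (end_ : String) :
    Nat → PySem.Dict String Int → List String → List String → Int → Option Int
  | 0, _, _, _, _ => none
  | _ + 1, _, [], [], _ => none
  | fuel + 1, dist, [], y :: ys, cost =>
    if y = end_ then some (cost + 1)
    else
      let st := (pvAdj g y).foldl (pvRelaxB pred_nodes (cost + 1)) (dist, ys, ([] : List String))
      pvLoopB g pred_nodes end_ fuel st.1 st.2.1 st.2.2 (cost + 1)
  | fuel + 1, dist, y :: ys, nxt, cost =>
    if y = end_ then some cost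
    else
      let st := (pvAdj g y).foldl (pvRelaxB pred_nodes cost) (dist, ys, nxt)
      pvLoopB g pred_nodes end_ fuel st.1 st.2.1 st.2.2 cost

def min_added_nodes_between_alt (graph : List (String × List String)) (pred_nodes : List String) (start : String) (end_ : String) : Option Int :=
  pvLoopB (PySem.Dict.ofList graph) pred_nodes end_ (pvFuel graph)
    (PySem.Dict.mk [(start, 0)]) [start] [] 0

-- ===== PRECONDITION & SPEC =====
def Spec_min_added_nodes_between (graph : List (String × List String)) (pred_nodes : List String) (start : String) (end_ : String) (out : Option Int) : Prop := out = min_added_nodes_between_alt graph pred_nodes start end_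
instance (graph : List (String × List String)) (pred_nodes : List String) (start : String) (end_ : String) (out : Option Int) : Decidable (Spec_min_added_nodes_between graph pred_nodes start end_ out) := by unfold Spec_min_added_nodes_between; infer_instance

-- ===== CLAIM (what is proved, stated in full; the proofs are below) =====
def Claim_equal_min_added_nodes_between : Prop := ∀ (graph : List (String × List String)) (pred_nodes : List String) (start : String) (end_ : String), Dom_min_added_nodes_between graph pred_nodes start end_ → Spec_min_added_nodes_between graph pred_nodes start end_ (min_added_nodes_between graph pred_nodes start end_)

-- ===== LEMMAS AND PROOFS =====

-- weight of stepping onto node v (0 if predicted, else 1); both programs' `new_cost - cost`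
def pvW (pred_nodes : List String) (v : String) : Int := if v ∈ pred_nodes then 0 else 1

lemma pvW_nonneg (pred_nodes : List String) (v : String) : 0 ≤ pvW pred_nodes v := by
  unfold pvW; split <;> omega

-- start→v walks and their 0/1 cost
inductive pvReach (g : PySem.Dict String (List String)) (pred_nodes : List String) (start : String) : String → Int → Prop
  | base : pvReach g pred_nodes start start 0
  | step {u c v} : pvReach g pred_nodes start u c → v ∈ pvAdj g u →
      pvReach g pred_nodes start v (c + pvW pred_nodes v)

-- what both programs return: the least reachable cost of end_ if it is ≤ 998, else none
def pvGood (g : PySem.Dict String (List String)) (pred_nodes : List String) (start end_ : String) : Option Int → Prop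
  | some c => pvReach g pred_nodes start end_ c ∧ c ≤ 998 ∧
      ∀ c', pvReach g pred_nodes start end_ c' → c ≤ c'
  | none => ∀ c, pvReach g pred_nodes start end_ c → 998 < c

lemma pvGood_unique (g : PySem.Dict String (List String)) (pred_nodes : List String)
    (start end_ : String) (o₁ o₂ : Option Int)
    (h₁ : pvGood g pred_nodes start end_ o₁) (h₂ : pvGood g pred_nodes start end_ o₂) :
    o₁ = o₂ := by
  cases o₁ with
  | none =>
    cases o₂ with
    | none => rfl
    | some b =>
      simp only [pvGood] at h₁ h₂
      exact absurd (h₁ b h₂.1) (by omega)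
  | some a =>
    cases o₂ with
    | none =>
      simp only [pvGood] at h₁ h₂
      exact absurd (h₂ a h₁.1) (by omega)
    | some b =>
      simp only [pvGood] at h₁ h₂
      have hab := h₁.2.2 b h₂.1
      have hba := h₂.2.2 a h₁.1
      simp only [Option.some.injEq]
      omega

-- v is fully relaxed at its current tentative distance
def pvDone (g : PySem.Dict String (List String)) (pred_nodes : List String)
    (best : PySem.Dict String Int) (v : String) : Prop :=
  ∀ x ∈ pvAdj g v, pvBget best x ≤ pvBget best v + pvW pred_nodes x

-- the loop invariant, over the queue as a bag of (cost, node) entries and the dict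
structure pvInv (g : PySem.Dict String (List String)) (pred_nodes : List String)
    (start end_ : String) (Q : List (Int × String)) (best : PySem.Dict String Int) : Prop where
  q_entries : ∀ q ∈ Q, 0 ≤ q.1 ∧ q.1 ≤ 998 ∧ pvReach g pred_nodes start q.2 q.1 ∧
      pvBget best q.2 ≤ q.1
  b_nonneg : ∀ v, 0 ≤ pvBget best v
  b_le : ∀ v, pvBget best v ≤ 999
  b_reach : ∀ v, pvBget best v ≤ 998 → pvReach g pred_nodes start v (pvBget best v)
  covered : ∀ v, pvBget best v ≤ 998 →
      (pvBget best v, v) ∈ Q ∨ pvDone g pred_nodes best v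
  end_in : pvBget best end_ ≤ 998 → (pvBget best end_, end_) ∈ Q
  start0 : pvBget best start ≤ 0

-- completeness: any reachable cost ≤ 998 is dominated by best or by a queue entry
lemma pvCL (g : PySem.Dict String (List String)) (pred_nodes : List String)
    (start end_ : String) (Q : List (Int × String)) (best : PySem.Dict String Int)
    (inv : pvInv g pred_nodes start end_ Q best) :
    ∀ v c, pvReach g pred_nodes start v c → c ≤ 998 →
      pvBget best v ≤ c ∨ ∃ q ∈ Q, q.1 ≤ c := by
  intro v c hr
  induction hr with
  | base => intro _; exact Or.inl inv.start0
  | @step u cu x hu hadj ih =>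
    intro h998
    have hw := pvW_nonneg pred_nodes x
    rcases ih (by omega) with hb | ⟨q, hq, hqle⟩
    · rcases inv.covered u (by omega) with hqm | hd
      · exact Or.inr ⟨_, hqm, by omega⟩
      · have := hd x hadj
        exact Or.inl (by omega)
    · exact Or.inr ⟨q, hq, by omega⟩

-- popping a minimal entry that is the target returns a correct answer
lemma pvPopGood (g : PySem.Dict String (List String)) (pred_nodes : List String)
    (start end_ : String) (Q : List (Int × String)) (best : PySem.Dict String Int)
    (m : Int × String) (inv : pvInv g pred_nodes start end_ Q best)
    (hmem : m ∈ Q) (hmin : ∀ q ∈ Q, m.1 ≤ q.1) (he : m.2 = end_) :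
    pvGood g pred_nodes start end_ (some m.1) := by
  obtain ⟨h0, h998, hre, hbm⟩ := inv.q_entries m hmem
  simp only [pvGood]
  refine ⟨he ▸ hre, h998, ?_⟩
  intro c' hr'
  by_cases h9 : c' ≤ 998
  · rcases pvCL g pred_nodes start end_ Q best inv end_ c' hr' h9 with hb | ⟨q, hq, hqle⟩
    · have hbe : pvBget best end_ ≤ m.1 := he ▸ hbm
      have hq := inv.end_in (by omega)
      have := hmin _ hq
      omega
    · have := hmin q hq; omega
  · omega

-- the empty queue returns a correct answer
lemma pvEmptyGood (g : PySem.Dict String (List String)) (pred_nodes : List String)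
    (start end_ : String) (best : PySem.Dict String Int)
    (inv : pvInv g pred_nodes start end_ [] best) :
    pvGood g pred_nodes start end_ none := by
  simp only [pvGood]
  intro c hr
  by_contra hlt
  push_neg at hlt
  rcases pvCL g pred_nodes start end_ [] best inv end_ c hr hlt with hb | ⟨q, hq, _⟩
  · have hbe : pvBget best end_ ≤ 998 := by omega
    exact absurd (inv.end_in hbe) (List.not_mem_nil)
  · exact absurd hq (List.not_mem_nil)

-- preservation: one pop-and-relax step keeps the invariant, for ANY queue discipline
-- that removes the popped entry and adds exactly the relaxed entries
lemma pvInvStep (g : PySem.Dict String (List String)) (pred_nodes : List String)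
    (start end_ : String) (Q Q' : List (Int × String)) (best best' : PySem.Dict String Int)
    (m : Int × String) (inv : pvInv g pred_nodes start end_ Q best)
    (hmem : m ∈ Q) (hne : m.2 ≠ end_)
    (hbmono : ∀ v, pvBget best' v ≤ pvBget best v)
    (hnew : ∀ v, pvBget best' v = pvBget best v ∨
      (pvBget best' v = m.1 + pvW pred_nodes v ∧ (pvBget best' v, v) ∈ Q' ∧ v ∈ pvAdj g m.2))
    (hkeep : ∀ q ∈ Q.erase m, q ∈ Q')
    (hQ' : ∀ q ∈ Q', q ∈ Q.erase m ∨ (q.2 ∈ pvAdj g m.2 ∧ q.1 = m.1 + pvW pred_nodes q.2 ∧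
      q.1 < pvBget best q.2 ∧ pvBget best' q.2 ≤ q.1))
    (hdone : ∀ x ∈ pvAdj g m.2, pvBget best' x ≤ m.1 + pvW pred_nodes x) :
    pvInv g pred_nodes start end_ Q' best' := by
  obtain ⟨hm0, hm998, hmre, hmb⟩ := inv.q_entries m hmem
  refine ⟨?_, ?_, ?_, ?_, ?_, ?_, ?_⟩
  · -- q_entries
    intro q hq
    rcases hQ' q hq with hqe | ⟨hadj, heq, hlt, hble⟩
    · obtain ⟨a, b, c, d⟩ := inv.q_entries q (List.mem_of_mem_erase hqe)
      exact ⟨a, b, c, le_trans (hbmono _) d⟩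
    · have hw := pvW_nonneg pred_nodes q.2
      have hb9 := inv.b_le q.2
      refine ⟨by omega, by omega, ?_, hble⟩
      rw [heq]
      exact pvReach.step hmre hadj
  · -- b_nonneg
    intro v
    rcases hnew v with h | ⟨h, _, _⟩
    · rw [h]; exact inv.b_nonneg v
    · have hw := pvW_nonneg pred_nodes v; omega
  · -- b_le
    intro v
    rcases hnew v with h | ⟨_, hq', _⟩
    · rw [h]; exact inv.b_le v
    · rcases hQ' _ hq' with hqe | ⟨_, _, hlt, _⟩
      · have hle2 : pvBget best' v ≤ 998 :=
          (inv.q_entries _ (List.mem_of_mem_erase hqe)).2.1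
        omega
      · have hlt' : pvBget best' v < pvBget best v := hlt
        have := inv.b_le v
        omega
  · -- b_reach
    intro v h998
    rcases hnew v with h | ⟨h, _, hadj⟩
    · rw [h] at h998 ⊢; exact inv.b_reach v h998
    · rw [h]; exact pvReach.step hmre hadj
  · -- covered
    intro v h998
    rcases hnew v with hsame | ⟨_, hq', _⟩
    · rcases inv.covered v (hsame ▸ h998) with hq | hd
      · by_cases hqm : (pvBget best v, v) = m
        · refine Or.inr ?_
          intro x hx
          have h1 : v = m.2 := congrArg Prod.snd hqm
          have h2 : pvBget best v = m.1 := congrArg Prod.fst hqm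
          have h3 : x ∈ pvAdj g m.2 := by rw [h1] at hx; exact hx
          have h4 := hdone x h3
          have hw := pvW_nonneg pred_nodes x
          omega
        · exact Or.inl (hsame ▸ hkeep _ ((List.mem_erase_of_ne hqm).mpr hq))
      · refine Or.inr ?_
        intro x hx
        have h1 := hbmono x
        have h2 := hd x hx
        omega
    · exact Or.inl hq'
  · -- end_in
    intro h998
    rcases hnew end_ with hsame | ⟨_, hq', _⟩
    · have hq := inv.end_in (hsame ▸ h998)
      have hne' : (pvBget best end_, end_) ≠ m := by
        intro h
        have h2 : end_ = m.2 := congrArg Prod.snd h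
        exact hne h2.symm
      exact hsame ▸ hkeep _ ((List.mem_erase_of_ne hne').mpr hq)
    · exact hq'
  · -- start0
    exact le_trans (hbmono start) inv.start0

-- the termination potential: queue length plus the total remaining headroom of best
def pvPot (cand : List String) (best : PySem.Dict String Int) : Nat :=
  (cand.map (fun v => (pvBget best v).toNat)).sum

lemma pvPot_mono (cand : List String) (d d' : PySem.Dict String Int)
    (h : ∀ v, pvBget d' v ≤ pvBget d v) : pvPot cand d' ≤ pvPot cand d := by
  induction cand with
  | nil => simp [pvPot]
  | cons x xs ih =>
    simp only [pvPot, List.map_cons, List.sum_cons] at *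
    exact Nat.add_le_add (Int.toNat_le_toNat (h x)) ih

lemma pvPot_strict (cand : List String) (d d' : PySem.Dict String Int) (x : String)
    (hx : x ∈ cand) (h : ∀ v, pvBget d' v ≤ pvBget d v)
    (h0 : 0 ≤ pvBget d' x) (hlt : pvBget d' x < pvBget d x) :
    pvPot cand d' < pvPot cand d := by
  induction cand with
  | nil => exact absurd hx (List.not_mem_nil)
  | cons y ys ih =>
    simp only [pvPot, List.map_cons, List.sum_cons] at *
    rcases List.mem_cons.mp hx with rfl | hys
    · have h1 : (pvBget d' x).toNat < (pvBget d x).toNat := by omega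
      have h2 := pvPot_mono ys d d' h
      simp only [pvPot] at h2
      omega
    · have h1 := Int.toNat_le_toNat (h y)
      have h2 := ih hys
      omega

lemma pvPot_le (cand : List String) (d : PySem.Dict String Int)
    (h : ∀ v, pvBget d v ≤ 999) : pvPot cand d ≤ 999 * cand.length := by
  induction cand with
  | nil => simp [pvPot]
  | cons y ys ih =>
    simp only [pvPot, List.map_cons, List.sum_cons, List.length_cons] at *
    have := h y
    omega

-- ---- port A: the heap pop ----
lemma pvHeapMin_mem : ∀ (l : List (Int × String)) (m : Int × String),
    pvHeapMin m l ∈ m :: l := by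
  intro l
  induction l with
  | nil => intro m; simp [pvHeapMin]
  | cons x xs ih =>
    intro m
    simp only [pvHeapMin]
    rcases List.mem_cons.mp (ih (if x.1 < m.1 ∨ (x.1 = m.1 ∧ x.2 < m.2) then x else m)) with h | h
    · rw [h]; split
      · exact List.mem_cons_of_mem _ List.mem_cons_self
      · exact List.mem_cons_self
    · exact List.mem_cons_of_mem _ (List.mem_cons_of_mem _ h)

lemma pvHeapMin_min : ∀ (l : List (Int × String)) (m : Int × String),
    ∀ q ∈ m :: l, (pvHeapMin m l).1 ≤ q.1 := by
  intro l
  induction l with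
  | nil =>
    intro m q hq
    rcases List.mem_cons.mp hq with rfl | h
    · simp [pvHeapMin]
    · exact absurd h (List.not_mem_nil)
  | cons x xs ih =>
    intro m q hq
    simp only [pvHeapMin]
    have hseed : (if x.1 < m.1 ∨ (x.1 = m.1 ∧ x.2 < m.2) then x else m).1 ≤ m.1 ∧
        (if x.1 < m.1 ∨ (x.1 = m.1 ∧ x.2 < m.2) then x else m).1 ≤ x.1 := by
      split
      · next hc =>
        rcases hc with hc | hc
        · exact ⟨le_of_lt hc, le_refl _⟩
        · exact ⟨le_of_eq hc.1, le_refl _⟩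
      · next hc =>
        rcases not_or.mp hc with ⟨h1, _⟩
        exact ⟨le_refl _, not_lt.mp h1⟩
    rcases List.mem_cons.mp hq with rfl | hq'
    · exact le_trans (ih _ _ List.mem_cons_self) hseed.1
    · rcases List.mem_cons.mp hq' with rfl | hq''
      · exact le_trans (ih _ _ List.mem_cons_self) hseed.2
      · exact ih _ _ (List.mem_cons_of_mem _ hq'')

-- ---- port A: what the relax fold does ----
lemma pvFoldA (pred_nodes : List String) (c : Int) (cand : List String) (hc : 0 ≤ c) :
    ∀ (adjL : List String) (Q₀ : List (Int × String)) (best₀ : PySem.Dict String Int)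
      (st : List (Int × String) × PySem.Dict String Int),
      st = adjL.foldl (pvRelaxA pred_nodes c) (Q₀, best₀) →
      (∀ v, 0 ≤ pvBget best₀ v) → (∀ x ∈ adjL, x ∈ cand) →
      (∀ v, pvBget st.2 v ≤ pvBget best₀ v) ∧
      (∀ v, pvBget st.2 v = pvBget best₀ v ∨
        (pvBget st.2 v = c + pvW pred_nodes v ∧ (pvBget st.2 v, v) ∈ st.1 ∧ v ∈ adjL)) ∧
      (∀ q ∈ Q₀, q ∈ st.1) ∧
      (∀ q ∈ st.1, q ∈ Q₀ ∨ (q.2 ∈ adjL ∧ q.1 = c + pvW pred_nodes q.2 ∧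
        q.1 < pvBget best₀ q.2 ∧ pvBget st.2 q.2 ≤ q.1)) ∧
      (∀ x ∈ adjL, pvBget st.2 x ≤ c + pvW pred_nodes x) ∧
      (st.1.length + pvPot cand st.2 ≤ Q₀.length + pvPot cand best₀) := by
  intro adjL
  induction adjL with
  | nil =>
    intro Q₀ best₀ st hst _ _
    subst hst
    refine ⟨fun v => le_refl _, fun v => Or.inl rfl, fun q hq => hq,
      fun q hq => Or.inl hq, ?_, le_refl _⟩
    intro x hx
    exact absurd hx (List.not_mem_nil)
  | cons x xs ih =>
    intro Q₀ best₀ st hst hnn hsub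
    rw [List.foldl_cons] at hst
    have hw := pvW_nonneg pred_nodes x
    have hrel : pvRelaxA pred_nodes c (Q₀, best₀) x =
        if c + pvW pred_nodes x < pvBget best₀ x then
          (Q₀ ++ [(c + pvW pred_nodes x, x)], PySem.Dict.insert best₀ x (c + pvW pred_nodes x))
        else (Q₀, best₀) := by
      simp only [pvRelaxA, pvW]
    by_cases hcond : c + pvW pred_nodes x < pvBget best₀ x
    · -- relaxed
      rw [hrel, if_pos hcond] at hst
      have hbkey : ∀ v, pvBget (PySem.Dict.insert best₀ x (c + pvW pred_nodes x)) v =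
          if v = x then c + pvW pred_nodes x else pvBget best₀ v := by
        intro v
        simp only [pvBget, PySem.Dict.getD_insert]
      obtain ⟨b1, b2, b3, b4, b5, b6⟩ := ih (Q₀ ++ [(c + pvW pred_nodes x, x)])
        (PySem.Dict.insert best₀ x (c + pvW pred_nodes x)) st hst
        (by intro v; rw [hbkey v]; split
            · omega
            · exact hnn v)
        (fun y hy => hsub y (List.mem_cons_of_mem _ hy))
      have hbx : pvBget (PySem.Dict.insert best₀ x (c + pvW pred_nodes x)) x =
          c + pvW pred_nodes x := by rw [hbkey]; simp
      have hb1' : ∀ v, pvBget (PySem.Dict.insert best₀ x (c + pvW pred_nodes x)) v ≤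
          pvBget best₀ v := by
        intro v; rw [hbkey v]; split
        · next hv => subst hv; omega
        · exact le_refl _
      refine ⟨fun v => le_trans (b1 v) (hb1' v), ?_, ?_, ?_, ?_, ?_⟩
      · intro v
        rcases b2 v with h | ⟨h1, h2, h3⟩
        · by_cases hv : v = x
          · subst hv
            refine Or.inr ⟨?_, ?_, List.mem_cons_self⟩
            · rw [h, hbx]
            · rw [h, hbx]
              exact b3 _ (List.mem_append_right _ List.mem_cons_self)
          · rw [h, hbkey, if_neg hv]; exact Or.inl rfl
        · exact Or.inr ⟨h1, h2, List.mem_cons_of_mem _ h3⟩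
      · intro q hq
        exact b3 q (List.mem_append_left _ hq)
      · intro q hq
        rcases b4 q hq with hq' | ⟨h1, h2, h3, h4⟩
        · rcases List.mem_append.mp hq' with hq'' | hq''
          · exact Or.inl hq''
          · have hq3 : q = (c + pvW pred_nodes x, x) := by simpa using hq''
            subst hq3
            refine Or.inr ⟨List.mem_cons_self, rfl, hcond, ?_⟩
            exact le_trans (b1 x) (le_of_eq hbx)
        · refine Or.inr ⟨List.mem_cons_of_mem _ h1, h2, lt_of_lt_of_le h3 (hb1' q.2), h4⟩
      · intro y hy
        rcases List.mem_cons.mp hy with rfl | hy'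
        · exact le_trans (b1 y) (le_of_eq hbx)
        · exact b5 y hy'
      · have hlen : (Q₀ ++ [(c + pvW pred_nodes x, x)]).length = Q₀.length + 1 := by simp
        have hstr : pvPot cand (PySem.Dict.insert best₀ x (c + pvW pred_nodes x)) <
            pvPot cand best₀ := by
          refine pvPot_strict cand best₀ _ x (hsub x List.mem_cons_self) hb1' ?_ ?_
          · omega
          · omega
        omega
    · -- not relaxed
      rw [hrel, if_neg hcond] at hst
      obtain ⟨b1, b2, b3, b4, b5, b6⟩ := ih Q₀ best₀ st hst hnn
        (fun y hy => hsub y (List.mem_cons_of_mem _ hy))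
      refine ⟨b1, ?_, b3, ?_, ?_, b6⟩
      · intro v
        rcases b2 v with h | ⟨h1, h2, h3⟩
        · exact Or.inl h
        · exact Or.inr ⟨h1, h2, List.mem_cons_of_mem _ h3⟩
      · intro q hq
        rcases b4 q hq with h | ⟨h1, h2, h3, h4⟩
        · exact Or.inl h
        · exact Or.inr ⟨List.mem_cons_of_mem _ h1, h2, h3, h4⟩
      · intro y hy
        rcases List.mem_cons.mp hy with rfl | hy'
        · push_neg at hcond
          exact le_trans (b1 y) hcond
        · exact b5 y hy'

-- ---- port A: main loop correctness ----
theorem pvLoopA_good (g : PySem.Dict String (List String)) (pred_nodes : List String)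
    (start end_ : String) (cand : List String)
    (hsub : ∀ u x, x ∈ pvAdj g u → x ∈ cand) :
    ∀ (fuel : Nat) (Q : List (Int × String)) (best : PySem.Dict String Int),
      pvInv g pred_nodes start end_ Q best → Q.length + pvPot cand best < fuel →
      pvGood g pred_nodes start end_ (pvLoopA g pred_nodes end_ fuel Q best) := by
  intro fuel
  induction fuel with
  | zero => intro Q best _ h; omega
  | succ n ih =>
    intro Q best inv hΦ
    cases Q with
    | nil =>
      simp only [pvLoopA]
      exact pvEmptyGood g pred_nodes start end_ best inv
    | cons p rest =>
      simp only [pvLoopA]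
      have hmem : pvHeapMin p rest ∈ p :: rest := pvHeapMin_mem rest p
      have hmin : ∀ q ∈ p :: rest, (pvHeapMin p rest).1 ≤ q.1 := pvHeapMin_min rest p
      by_cases he : (pvHeapMin p rest).2 = end_
      · rw [if_pos he]
        exact pvPopGood g pred_nodes start end_ (p :: rest) best _ inv hmem hmin he
      · rw [if_neg he]
        obtain ⟨hm0, hm998, hmre, hmb⟩ := inv.q_entries _ hmem
        obtain ⟨b1, b2, b3, b4, b5, b6⟩ := pvFoldA pred_nodes (pvHeapMin p rest).1 cand hm0
          (pvAdj g (pvHeapMin p rest).2) ((p :: rest).erase (pvHeapMin p rest)) best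
          _ rfl inv.b_nonneg (fun x hx => hsub _ x hx)
        have inv' := pvInvStep g pred_nodes start end_ (p :: rest) _ best _
          (pvHeapMin p rest) inv hmem he b1 b2 b3 b4 b5
        have hlen : ((p :: rest).erase (pvHeapMin p rest)).length = (p :: rest).length - 1 :=
          List.length_erase_of_mem hmem
        have hlen2 : (p :: rest).length = rest.length + 1 := by simp
        exact ih _ _ inv' (by omega)

-- ---- port B: the two reversed stacks, viewed as one queue of (cost, node) entries ----
def pvQv (c : Int) (cur nxt : List String) : List (Int × String) :=
  cur.map (fun v => (c, v)) ++ nxt.map (fun v => (c + 1, v))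

lemma pvQv_nil (c : Int) : pvQv c [] [] = [] := rfl

lemma pvQv_cons (c : Int) (y : String) (cur nxt : List String) :
    pvQv c (y :: cur) nxt = (c, y) :: pvQv c cur nxt := rfl

lemma pvQv_shift (c : Int) (l : List String) : pvQv c [] l = pvQv (c + 1) l [] := by
  simp [pvQv]

lemma pvQv_length (c : Int) (cur nxt : List String) :
    (pvQv c cur nxt).length = cur.length + nxt.length := by
  simp [pvQv]

lemma pvQv_mem (c : Int) (cur nxt : List String) (q : Int × String) :
    q ∈ pvQv c cur nxt ↔ (q.1 = c ∧ q.2 ∈ cur) ∨ (q.1 = c + 1 ∧ q.2 ∈ nxt) := by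
  cases q with
  | mk a b =>
    simp only [pvQv, List.mem_append, List.mem_map, Prod.mk.injEq]
    constructor
    · rintro (⟨v, hv, h1, h2⟩ | ⟨v, hv, h1, h2⟩)
      · exact Or.inl ⟨h1.symm, h2 ▸ hv⟩
      · exact Or.inr ⟨h1.symm, h2 ▸ hv⟩
    · rintro (⟨h1, h2⟩ | ⟨h1, h2⟩)
      · exact Or.inl ⟨b, h2, h1.symm, rfl⟩
      · exact Or.inr ⟨b, h2, h1.symm, rfl⟩

lemma pvQv_min (c : Int) (cur nxt : List String) :
    ∀ q ∈ pvQv c cur nxt, c ≤ q.1 := by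
  intro q hq
  rcases (pvQv_mem c cur nxt q).mp hq with ⟨h, _⟩ | ⟨h, _⟩ <;> omega

-- ---- port B: what the relax fold does (same facts as pvFoldA, on the queue view) ----
lemma pvFoldB (pred_nodes : List String) (c : Int) (cand : List String) (hc : 0 ≤ c) :
    ∀ (adjL : List String) (dist₀ : PySem.Dict String Int) (cur₀ nxt₀ : List String)
      (st : PySem.Dict String Int × List String × List String),
      st = adjL.foldl (pvRelaxB pred_nodes c) (dist₀, cur₀, nxt₀) →
      (∀ v, 0 ≤ pvBget dist₀ v) → (∀ x ∈ adjL, x ∈ cand) →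
      (∀ v, pvBget st.1 v ≤ pvBget dist₀ v) ∧
      (∀ v, pvBget st.1 v = pvBget dist₀ v ∨
        (pvBget st.1 v = c + pvW pred_nodes v ∧ (pvBget st.1 v, v) ∈ pvQv c st.2.1 st.2.2 ∧
          v ∈ adjL)) ∧
      (∀ q ∈ pvQv c cur₀ nxt₀, q ∈ pvQv c st.2.1 st.2.2) ∧
      (∀ q ∈ pvQv c st.2.1 st.2.2, q ∈ pvQv c cur₀ nxt₀ ∨
        (q.2 ∈ adjL ∧ q.1 = c + pvW pred_nodes q.2 ∧
        q.1 < pvBget dist₀ q.2 ∧ pvBget st.1 q.2 ≤ q.1)) ∧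
      (∀ x ∈ adjL, pvBget st.1 x ≤ c + pvW pred_nodes x) ∧
      ((pvQv c st.2.1 st.2.2).length + pvPot cand st.1 ≤
        (pvQv c cur₀ nxt₀).length + pvPot cand dist₀) := by
  intro adjL
  induction adjL with
  | nil =>
    intro dist₀ cur₀ nxt₀ st hst _ _
    subst hst
    refine ⟨fun v => le_refl _, fun v => Or.inl rfl, fun q hq => hq,
      fun q hq => Or.inl hq, ?_, le_refl _⟩
    intro x hx
    exact absurd hx (List.not_mem_nil)
  | cons x xs ih =>
    intro dist₀ cur₀ nxt₀ st hst hnn hsub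
    rw [List.foldl_cons] at hst
    have hw := pvW_nonneg pred_nodes x
    have hnc : (if x ∈ pred_nodes then c else c + 1) = c + pvW pred_nodes x := by
      unfold pvW; split <;> omega
    by_cases hcond : c + pvW pred_nodes x < pvBget dist₀ x
    · -- relaxed; the new entry goes to the front stack (weight 0) or the back stack (weight 1)
      have hrel0 : pvRelaxB pred_nodes c (dist₀, cur₀, nxt₀) x =
          if c + pvW pred_nodes x = c
          then (PySem.Dict.insert dist₀ x (c + pvW pred_nodes x), x :: cur₀, nxt₀)
          else (PySem.Dict.insert dist₀ x (c + pvW pred_nodes x), cur₀, x :: nxt₀) := by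
        simp only [pvRelaxB, hnc, if_pos hcond]
      have hstep : ∃ cur₁ nxt₁,
          pvRelaxB pred_nodes c (dist₀, cur₀, nxt₀) x =
            (PySem.Dict.insert dist₀ x (c + pvW pred_nodes x), cur₁, nxt₁) ∧
          ((c + pvW pred_nodes x, x) ∈ pvQv c cur₁ nxt₁) ∧
          (∀ q ∈ pvQv c cur₀ nxt₀, q ∈ pvQv c cur₁ nxt₁) ∧
          (∀ q ∈ pvQv c cur₁ nxt₁, q = (c + pvW pred_nodes x, x) ∨ q ∈ pvQv c cur₀ nxt₀) ∧
          (pvQv c cur₁ nxt₁).length = (pvQv c cur₀ nxt₀).length + 1 := by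
        by_cases hp : x ∈ pred_nodes
        · have hw0 : pvW pred_nodes x = 0 := by simp [pvW, hp]
          refine ⟨x :: cur₀, nxt₀, ?_, ?_, ?_, ?_, ?_⟩
          · rw [hrel0, if_pos (by omega)]
          · rw [hw0, add_zero, pvQv_cons]; exact List.mem_cons_self
          · intro q hq; rw [pvQv_cons]; exact List.mem_cons_of_mem _ hq
          · intro q hq
            rw [pvQv_cons] at hq
            rcases List.mem_cons.mp hq with h | h
            · left; rw [hw0, add_zero]; exact h
            · right; exact h
          · rw [pvQv_cons]; simp
        · have hw1 : pvW pred_nodes x = 1 := by simp [pvW, hp]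
          refine ⟨cur₀, x :: nxt₀, ?_, ?_, ?_, ?_, ?_⟩
          · rw [hrel0, if_neg (by omega)]
          · exact (pvQv_mem _ _ _ _).mpr (Or.inr ⟨by rw [hw1], List.mem_cons_self⟩)
          · intro q hq
            rw [pvQv_mem] at hq ⊢
            rcases hq with ⟨h1, h2⟩ | ⟨h1, h2⟩
            · exact Or.inl ⟨h1, h2⟩
            · exact Or.inr ⟨h1, List.mem_cons_of_mem _ h2⟩
          · intro q hq
            rw [pvQv_mem] at hq
            rcases hq with ⟨h1, h2⟩ | ⟨h1, h2⟩
            · right; rw [pvQv_mem]; exact Or.inl ⟨h1, h2⟩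
            · rcases List.mem_cons.mp h2 with h3 | h3
              · left
                have : q = (c + 1, x) := by
                  rcases q with ⟨qa, qb⟩
                  simp only [Prod.mk.injEq]
                  exact ⟨h1, h3⟩
                rw [this, hw1]
              · right; rw [pvQv_mem]; exact Or.inr ⟨h1, h3⟩
          · simp only [pvQv_length, List.length_cons]; omega
      obtain ⟨cur₁, nxt₁, hrel, hin, hkeep₁, hback₁, hlen₁⟩ := hstep
      rw [hrel] at hst
      have hbkey : ∀ v, pvBget (PySem.Dict.insert dist₀ x (c + pvW pred_nodes x)) v =
          if v = x then c + pvW pred_nodes x else pvBget dist₀ v := by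
        intro v
        simp only [pvBget, PySem.Dict.getD_insert]
      obtain ⟨b1, b2, b3, b4, b5, b6⟩ := ih (PySem.Dict.insert dist₀ x (c + pvW pred_nodes x))
        cur₁ nxt₁ st hst
        (by intro v; rw [hbkey v]; split
            · omega
            · exact hnn v)
        (fun y hy => hsub y (List.mem_cons_of_mem _ hy))
      have hbx : pvBget (PySem.Dict.insert dist₀ x (c + pvW pred_nodes x)) x =
          c + pvW pred_nodes x := by rw [hbkey]; simp
      have hb1' : ∀ v, pvBget (PySem.Dict.insert dist₀ x (c + pvW pred_nodes x)) v ≤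
          pvBget dist₀ v := by
        intro v; rw [hbkey v]; split
        · next hv => subst hv; omega
        · exact le_refl _
      refine ⟨fun v => le_trans (b1 v) (hb1' v), ?_, ?_, ?_, ?_, ?_⟩
      · intro v
        rcases b2 v with h | ⟨h1, h2, h3⟩
        · by_cases hv : v = x
          · subst hv
            refine Or.inr ⟨?_, ?_, List.mem_cons_self⟩
            · rw [h, hbx]
            · rw [h, hbx]
              exact b3 _ hin
          · rw [h, hbkey, if_neg hv]; exact Or.inl rfl
        · exact Or.inr ⟨h1, h2, List.mem_cons_of_mem _ h3⟩
      · intro q hq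
        exact b3 q (hkeep₁ q hq)
      · intro q hq
        rcases b4 q hq with hq' | ⟨h1, h2, h3, h4⟩
        · rcases hback₁ q hq' with hq'' | hq''
          · subst hq''
            refine Or.inr ⟨List.mem_cons_self, rfl, hcond, ?_⟩
            exact le_trans (b1 x) (le_of_eq hbx)
          · exact Or.inl hq''
        · refine Or.inr ⟨List.mem_cons_of_mem _ h1, h2, lt_of_lt_of_le h3 (hb1' q.2), h4⟩
      · intro y hy
        rcases List.mem_cons.mp hy with rfl | hy'
        · exact le_trans (b1 y) (le_of_eq hbx)
        · exact b5 y hy'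
      · have hstr : pvPot cand (PySem.Dict.insert dist₀ x (c + pvW pred_nodes x)) <
            pvPot cand dist₀ := by
          refine pvPot_strict cand dist₀ _ x (hsub x List.mem_cons_self) hb1' ?_ ?_
          · omega
          · omega
        omega
    · -- not relaxed
      have hrel2 : pvRelaxB pred_nodes c (dist₀, cur₀, nxt₀) x = (dist₀, cur₀, nxt₀) := by
        simp only [pvRelaxB, hnc, if_neg hcond]
      rw [hrel2] at hst
      obtain ⟨b1, b2, b3, b4, b5, b6⟩ := ih dist₀ cur₀ nxt₀ st hst hnn
        (fun y hy => hsub y (List.mem_cons_of_mem _ hy))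
      refine ⟨b1, ?_, b3, ?_, ?_, b6⟩
      · intro v
        rcases b2 v with h | ⟨h1, h2, h3⟩
        · exact Or.inl h
        · exact Or.inr ⟨h1, h2, List.mem_cons_of_mem _ h3⟩
      · intro q hq
        rcases b4 q hq with h | ⟨h1, h2, h3, h4⟩
        · exact Or.inl h
        · exact Or.inr ⟨List.mem_cons_of_mem _ h1, h2, h3, h4⟩
      · intro y hy
        rcases List.mem_cons.mp hy with rfl | hy'
        · push_neg at hcond
          exact le_trans (b1 y) hcond
        · exact b5 y hy'

-- ---- port B: one pop-and-relax step ----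
lemma pvStepB (g : PySem.Dict String (List String)) (pred_nodes : List String)
    (start end_ : String) (cand : List String)
    (hsub : ∀ u x, x ∈ pvAdj g u → x ∈ cand) (n : Nat)
    (ih : ∀ (dist : PySem.Dict String Int) (cur nxt : List String) (cost : Int),
      pvInv g pred_nodes start end_ (pvQv cost cur nxt) dist →
      (pvQv cost cur nxt).length + pvPot cand dist < n →
      pvGood g pred_nodes start end_ (pvLoopB g pred_nodes end_ n dist cur nxt cost))
    (dist : PySem.Dict String Int) (y : String) (ys nxt : List String) (cost : Int)
    (inv : pvInv g pred_nodes start end_ (pvQv cost (y :: ys) nxt) dist)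
    (hΦ : (pvQv cost (y :: ys) nxt).length + pvPot cand dist < n + 1) :
    pvGood g pred_nodes start end_ (if y = end_ then some cost else
      pvLoopB g pred_nodes end_ n
        ((pvAdj g y).foldl (pvRelaxB pred_nodes cost) (dist, ys, nxt)).1
        ((pvAdj g y).foldl (pvRelaxB pred_nodes cost) (dist, ys, nxt)).2.1
        ((pvAdj g y).foldl (pvRelaxB pred_nodes cost) (dist, ys, nxt)).2.2 cost) := by
  have hmem : (cost, y) ∈ pvQv cost (y :: ys) nxt := by
    rw [pvQv_cons]; exact List.mem_cons_self
  by_cases he : y = end_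
  · rw [if_pos he]
    exact pvPopGood g pred_nodes start end_ _ dist (cost, y) inv hmem (pvQv_min _ _ _) he
  · rw [if_neg he]
    obtain ⟨hm0, hm998, hmre, hmb⟩ := inv.q_entries _ hmem
    obtain ⟨b1, b2, b3, b4, b5, b6⟩ := pvFoldB pred_nodes cost cand hm0 (pvAdj g y)
      dist ys nxt _ rfl inv.b_nonneg (fun x hx => hsub y x hx)
    have herase : (pvQv cost (y :: ys) nxt).erase (cost, y) = pvQv cost ys nxt := by
      rw [pvQv_cons, List.erase_cons_head]
    have hkeep : ∀ q ∈ (pvQv cost (y :: ys) nxt).erase (cost, y),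
        q ∈ pvQv cost ((pvAdj g y).foldl (pvRelaxB pred_nodes cost) (dist, ys, nxt)).2.1
          ((pvAdj g y).foldl (pvRelaxB pred_nodes cost) (dist, ys, nxt)).2.2 := by
      rw [herase]; exact b3
    have hQ' : ∀ q ∈ pvQv cost ((pvAdj g y).foldl (pvRelaxB pred_nodes cost) (dist, ys, nxt)).2.1
        ((pvAdj g y).foldl (pvRelaxB pred_nodes cost) (dist, ys, nxt)).2.2,
        q ∈ (pvQv cost (y :: ys) nxt).erase (cost, y) ∨
        (q.2 ∈ pvAdj g y ∧ q.1 = cost + pvW pred_nodes q.2 ∧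
          q.1 < pvBget dist q.2 ∧
          pvBget ((pvAdj g y).foldl (pvRelaxB pred_nodes cost) (dist, ys, nxt)).1 q.2 ≤ q.1) := by
      rw [herase]; exact b4
    have inv' := pvInvStep g pred_nodes start end_ (pvQv cost (y :: ys) nxt) _ dist _
      (cost, y) inv hmem he b1 b2 hkeep hQ' b5
    have hlen := pvQv_length cost (y :: ys) nxt
    have hlen2 := pvQv_length cost ys nxt
    have hlen3 : (y :: ys).length = ys.length + 1 := by simp
    exact ih _ _ _ cost inv' (by omega)

-- ---- port B: main loop correctness ----
theorem pvLoopB_good (g : PySem.Dict String (List String)) (pred_nodes : List String)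
    (start end_ : String) (cand : List String)
    (hsub : ∀ u x, x ∈ pvAdj g u → x ∈ cand) :
    ∀ (fuel : Nat) (dist : PySem.Dict String Int) (cur nxt : List String) (cost : Int),
      pvInv g pred_nodes start end_ (pvQv cost cur nxt) dist →
      (pvQv cost cur nxt).length + pvPot cand dist < fuel →
      pvGood g pred_nodes start end_ (pvLoopB g pred_nodes end_ fuel dist cur nxt cost) := by
  intro fuel
  induction fuel with
  | zero => intro dist cur nxt cost _ h; omega
  | succ n ih =>
    intro dist cur nxt cost inv hΦ
    cases cur with
    | nil =>
      cases nxt with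
      | nil =>
        simp only [pvLoopB]
        rw [pvQv_nil] at inv
        exact pvEmptyGood g pred_nodes start end_ dist inv
      | cons y ys =>
        rw [pvQv_shift] at inv hΦ
        simp only [pvLoopB]
        exact pvStepB g pred_nodes start end_ cand hsub n ih dist y ys [] (cost + 1) inv hΦ
    | cons y ys =>
      simp only [pvLoopB]
      exact pvStepB g pred_nodes start end_ cand hsub n ih dist y ys nxt cost inv hΦ

-- ---- the shared initial state ----
lemma pvBget_init (start v : String) :
    pvBget (PySem.Dict.mk [(start, 0)]) v = if v = start then 0 else 999 := by
  simp only [pvBget, PySem.Dict.getD_eq_get?_getD, PySem.Dict.get?_mk_cons]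
  by_cases hv : v = start
  · subst hv
    simp
  · have hb : (start == v) = false := beq_eq_false_iff_ne.mpr (fun h => hv h.symm)
    rw [hb]
    simp only [Bool.false_eq_true, if_false, if_neg hv]
    rfl

lemma pvInit (g : PySem.Dict String (List String)) (pred_nodes : List String)
    (start end_ : String) :
    pvInv g pred_nodes start end_ [(0, start)] (PySem.Dict.mk [(start, 0)]) := by
  have hb := pvBget_init start
  refine ⟨?_, ?_, ?_, ?_, ?_, ?_, ?_⟩
  · intro q hq
    have hq' : q = (0, start) := by simpa using hq
    subst hq'
    refine ⟨le_refl 0, by omega, pvReach.base, ?_⟩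
    rw [hb]; simp
  · intro v; rw [hb v]; split <;> omega
  · intro v; rw [hb v]; split <;> omega
  · intro v h
    rw [hb v] at h ⊢
    by_cases hv : v = start
    · subst hv; rw [if_pos rfl]; exact pvReach.base
    · rw [if_neg hv] at h; omega
  · intro v h
    rw [hb v] at h
    by_cases hv : v = start
    · subst hv; left; rw [hb]; simp
    · rw [if_neg hv] at h; omega
  · intro h
    rw [hb end_] at h ⊢
    by_cases hv : end_ = start
    · rw [if_pos hv]; simp [hv]
    · rw [if_neg hv] at h; omega
  · rw [hb start]; simp

-- ---- the candidate nodes: everything the relax loops can ever touch ----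
def pvCandL (graph : List (String × List String)) (start : String) : List String :=
  start :: (graph.map Prod.snd).flatten

lemma pvItems_update_sub : ∀ (ps : List (String × List String))
    (d : PySem.Dict String (List String)) (q : String × List String),
    q ∈ (PySem.Dict.update d ps).items → q ∈ d.items ∨ q ∈ ps := by
  intro ps
  induction ps with
  | nil => intro d q h; exact Or.inl h
  | cons p ps ih =>
    intro d q h
    rcases ih (d.insert p.1 p.2) q h with h' | h'
    · rcases (PySem.Dict.mem_items_insert d p.1 p.2 q).mp h' with h'' | h''
      · right
        rw [h'', Prod.mk.eta]
        exact List.mem_cons_self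
      · exact Or.inl h''.1
    · exact Or.inr (List.mem_cons_of_mem _ h')

lemma pvAdj_sub (graph : List (String × List String)) (start : String) :
    ∀ u x, x ∈ pvAdj (PySem.Dict.ofList graph) u → x ∈ pvCandL graph start := by
  intro u x hx
  unfold pvAdj at hx
  rw [PySem.Dict.getD_eq_get?_getD] at hx
  cases hg : PySem.Dict.get? (PySem.Dict.ofList graph) u with
  | none => rw [hg] at hx; exact absurd hx (List.not_mem_nil)
  | some l =>
    rw [hg] at hx
    simp only [Option.getD_some] at hx
    have hm := PySem.Dict.mem_items_of_get?_eq_some _ hg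
    have hgr : (u, l) ∈ graph := by
      rcases pvItems_update_sub graph PySem.Dict.empty (u, l) hm with h | h
      · exact absurd h (List.not_mem_nil)
      · exact h
    refine List.mem_cons_of_mem _ ?_
    rw [List.mem_flatten]
    exact ⟨l, List.mem_map_of_mem hgr, hx⟩

-- ===== VERDICT (by name: the statement is the Claim_ definition above) =====
theorem min_added_nodes_between_spec : Claim_equal_min_added_nodes_between := by
  intro graph pred_nodes start end_ _
  unfold Spec_min_added_nodes_between
  unfold min_added_nodes_between min_added_nodes_between_alt
  have hsub := pvAdj_sub graph start
  have hinv := pvInit (PySem.Dict.ofList graph) pred_nodes start end_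
  have hpot := pvPot_le (pvCandL graph start) (PySem.Dict.mk [(start, 0)]) hinv.b_le
  have hlen : (pvCandL graph start).length = 1 + (graph.map (fun p => p.2.length)).sum := by
    simp only [pvCandL, List.length_cons, List.length_flatten, List.map_map]
    have hmm : List.map (List.length ∘ Prod.snd) graph = graph.map (fun p => p.2.length) := by
      simp [Function.comp_def]
    rw [hmm]
    omega
  have hfu : 1 + pvPot (pvCandL graph start) (PySem.Dict.mk [(start, 0)]) < pvFuel graph := by
    unfold pvFuel; omega
  have hA := pvLoopA_good (PySem.Dict.ofList graph) pred_nodes start end_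
    (pvCandL graph start) hsub (pvFuel graph) [(0, start)] (PySem.Dict.mk [(start, 0)])
    hinv (by simpa using hfu)
  have hB := pvLoopB_good (PySem.Dict.ofList graph) pred_nodes start end_
    (pvCandL graph start) hsub (pvFuel graph) (PySem.Dict.mk [(start, 0)]) [start] [] 0
    hinv (by rw [pvQv_length]; simpa using hfu)
  exact pvGood_unique (PySem.Dict.ofList graph) pred_nodes start end_ _ _ hA hB
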